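-- pv_equiv track=rewrite | github.com/cyberinfidel/Parallax | Code/Logo2Pico8/PNG2PICO8.py | findBestEncode
-- ===== SOURCE A (Python) =====
-- char_table=["\\0","¹","²","³","⁴","⁵","⁶","⁷","⁸","\\t","\\n","ᵇ","ᶜ","\\r","ᵉ","ᶠ","▮","■","□","⁙","⁘","‖","◀","▶","「","」","¥","•","、","。","゛","゜"," ","!","\\\"","#","$","%","&","'","(",")","*","+",",","-",".","/","0","1","2","3","4","5","6","7","8","9",":",";","<","=",">","?","@","A","B","C","D","E","F","G","H","I","J","K","L","M","N","O","P","Q","R","S","T","U","V","W","X","Y","Z","[","\\\\","]","^","_","`","a","b","c","d","e","f","g","h","i","j","k","l","m","n","o","p","q","r","s","t","u","v","w","x","y","z","{","|","}","~","○","█","▒","🐱","⬇️","░","✽","●","♥","☉","웃","⌂","⬅️","😐","♪","🅾️","◆","…","➡️","★","⧗","⬆️","ˇ","∧","❎","▤","▥","あ","い","う","え","お","か","き","く","け","こ","さ","し","す","せ","そ","た","ち","つ","て","と","な","に","ぬ","ね","の","は","ひ","ふ","へ","ほ","ま","み","む","め","も","や","ゆ","よ","ら","り","る","れ","ろ","わ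","を","ん","っ","ゃ","ゅ","ょ","ア","イ","ウ","エ","オ","カ","キ","ク","ケ","コ","サ","シ","ス","セ","ソ","タ","チ","ツ","テ","ト","ナ","ニ","ヌ","ネ","ノ","ハ","ヒ","フ","ヘ","ホ","マ","ミ","ム","メ","モ","ヤ","ユ","ヨ","ラ","リ","ル","レ","ロ","ワ","ヲ","ン","ッ","ャ","ュ","ョ","◜","◝",]
--
-- def encode8bitDataAsPICO8String(data,trans=80):
-- 	str=''
-- 	for i,d in enumerate(data):
-- 		if (d+trans)%256==0:
-- 			if i+1<len(data):
-- 				if data[i+1]+trans>=48 and data[i+1]+trans<=57: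
-- 					str+='\\000'
-- 				else:
-- 					str+='\\0'
-- 		else:
-- 			str+=char_table[(d+trans)%256]
-- 	return str
--
-- def findBestEncode(data):
-- 	best_length=len(data)*2 # set v high upper limit
-- 	data_length=len(data)
-- 	best_trans=-1
-- 	for trans in range(256):
-- 		str=encode8bitDataAsPICO8String(data,trans)
-- 		if len(str)<best_length:
-- 			best_trans=trans
-- 			best_length=len(str)
-- 			if best_length==data_length: # can't get better than 1:1
-- 				break
-- 	return encode8bitDataAsPICO8String([best_trans],0)+encode8bitDataAsPICO8String(data,best_trans), best_trans
-- ===== SOURCE B (Python) =====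
-- # B: the PICO-8 glyph table is stored as Unicode codepoint tuples, and each
-- # translation's encoded length is computed arithmetically from a byte-value
-- # histogram plus a one-pass zero-byte correction table, instead of building all
-- # 256 candidate strings as A does; only the winning encoding is materialised.
-- CHAR_CODES = [
--     (92,48), (185,), (178,), (179,), (8308,), (8309,), (8310,), (8311,),
--     (8312,), (92,116), (92,110), (7495,), (7580,), (92,114), (7497,), (7584,),
--     (9646,), (9632,), (9633,), (8281,), (8280,), (8214,), (9664,), (9654,),
--     (12300,), (12301,), (165,), (8226,), (12289,), (12290,), (12443,), (12444,),
--     (32,), (33,), (92,34), (35,), (36,), (37,), (38,), (39,),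
--     (40,), (41,), (42,), (43,), (44,), (45,), (46,), (47,),
--     (48,), (49,), (50,), (51,), (52,), (53,), (54,), (55,),
--     (56,), (57,), (58,), (59,), (60,), (61,), (62,), (63,),
--     (64,), (65,), (66,), (67,), (68,), (69,), (70,), (71,),
--     (72,), (73,), (74,), (75,), (76,), (77,), (78,), (79,),
--     (80,), (81,), (82,), (83,), (84,), (85,), (86,), (87,),
--     (88,), (89,), (90,), (91,), (92,92), (93,), (94,), (95,),
--     (96,), (97,), (98,), (99,), (100,), (101,), (102,), (103,),
--     (104,), (105,), (106,), (107,), (108,), (109,), (110,), (111,),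
--     (112,), (113,), (114,), (115,), (116,), (117,), (118,), (119,),
--     (120,), (121,), (122,), (123,), (124,), (125,), (126,), (9675,),
--     (9608,), (9618,), (128049,), (11015,65039), (9617,), (10045,), (9679,), (9829,),
--     (9737,), (50883,), (8962,), (11013,65039), (128528,), (9834,), (127358,65039), (9670,),
--     (8230,), (10145,65039), (9733,), (10711,), (11014,65039), (711,), (8743,), (10062,),
--     (9636,), (9637,), (12354,), (12356,), (12358,), (12360,), (12362,), (12363,),
--     (12365,), (12367,), (12369,), (12371,), (12373,), (12375,), (12377,), (12379,),
--     (12381,), (12383,), (12385,), (12388,), (12390,), (12392,), (12394,), (12395,),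
--     (12396,), (12397,), (12398,), (12399,), (12402,), (12405,), (12408,), (12411,),
--     (12414,), (12415,), (12416,), (12417,), (12418,), (12420,), (12422,), (12424,),
--     (12425,), (12426,), (12427,), (12428,), (12429,), (12431,), (12434,), (12435,),
--     (12387,), (12419,), (12421,), (12423,), (12450,), (12452,), (12454,), (12456,),
--     (12458,), (12459,), (12461,), (12463,), (12465,), (12467,), (12469,), (12471,),
--     (12473,), (12475,), (12477,), (12479,), (12481,), (12484,), (12486,), (12488,),
--     (12490,), (12491,), (12492,), (12493,), (12494,), (12495,), (12498,), (12501,),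
--     (12504,), (12507,), (12510,), (12511,), (12512,), (12513,), (12514,), (12516,),
--     (12518,), (12520,), (12521,), (12522,), (12523,), (12524,), (12525,), (12527,),
--     (12530,), (12531,), (12483,), (12515,), (12517,), (12519,), (9692,), (9693,),
-- ]
--
-- _table = [''.join(chr(c) for c in cs) for cs in CHAR_CODES]
--
-- def _tok(data, trans, i, d):
--     # the token one data byte encodes to under this translation
--     v = (d + trans) % 256
--     if v == 0:
--         if i + 1 >= len(data):
--             return ''
--         if 48 <= data[i + 1] + trans <= 57:
--             return '\\000'
--         return '\\0'
--     return _table[v]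
--
-- def findBestEncode(data):
--     n = len(data)
--     cl = [len(cs) for cs in CHAR_CODES]
--     cnt = [0] * 256
--     for d in data:
--         cnt[d % 256] += 1
--     # corrections for bytes that map to 0 under trans = (-d) % 256: the plain
--     # histogram charges them len('\\0') == 2; the last byte really costs 0 and
--     # a zero byte followed by a digit costs 4.
--     adj = [0] * 256
--     for i, d in enumerate(data):
--         t0 = (-d) % 256
--         if i + 1 == n:
--             adj[t0] -= 2
--         elif 48 <= data[i + 1] + t0 <= 57:
--             adj[t0] += 2
--     best_length = 2 * n
--     best_trans = -1
--     for t in range(256):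
--         length = adj[t] + sum(cnt[r] * cl[(r + t) % 256] for r in range(256))
--         if length < best_length:
--             best_trans = t
--             best_length = length
--             if best_length == n:
--                 break
--     prefix = _tok([best_trans], 0, 0, best_trans)
--     body = ''.join(_tok(data, best_trans, i, d) for i, d in enumerate(data))
--     return prefix + body, best_trans
-- ===== Notes on version B (the rewrite author's own statement) =====
-- stated objective: faster
-- what changed: B stores the glyph table as codepoint lists and, instead of building all 256 candidate encodings as strings (O(256*n) string work), computes each translation's encoded length arithmetically from a byte-value histogram plus a one-pass correction table for zero-mapping bytes (O(n + 256^2)), building only the winning encoding.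
import Mathlib
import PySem

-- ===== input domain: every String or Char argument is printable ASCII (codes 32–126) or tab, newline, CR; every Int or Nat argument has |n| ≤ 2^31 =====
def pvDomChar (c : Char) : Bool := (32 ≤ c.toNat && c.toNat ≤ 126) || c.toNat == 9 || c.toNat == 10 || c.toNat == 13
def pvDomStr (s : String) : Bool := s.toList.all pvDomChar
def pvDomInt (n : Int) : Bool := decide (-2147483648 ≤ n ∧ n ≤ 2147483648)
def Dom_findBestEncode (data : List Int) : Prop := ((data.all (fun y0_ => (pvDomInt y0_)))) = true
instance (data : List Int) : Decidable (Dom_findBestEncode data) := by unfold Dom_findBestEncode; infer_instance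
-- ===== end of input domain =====

-- B stores the glyph table as codepoint lists and replaces A's 256 trial string
-- encodings by a histogram + correction-table length computation; only the
-- winning encoding is built.

-- ===== PORT A =====
def charTable : List String := [
  "\\0", "¹", "²", "³", "⁴", "⁵", "⁶", "⁷",
  "⁸", "\\t", "\\n", "ᵇ", "ᶜ", "\\r", "ᵉ", "ᶠ",
  "▮", "■", "□", "⁙", "⁘", "‖", "◀", "▶",
  "「", "」", "¥", "•", "、", "。", "゛", "゜",
  " ", "!", "\\\"", "#", "$", "%", "&", "'",
  "(", ")", "*", "+", ",", "-", ".", "/",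
  "0", "1", "2", "3", "4", "5", "6", "7",
  "8", "9", ":", ";", "<", "=", ">", "?",
  "@", "A", "B", "C", "D", "E", "F", "G",
  "H", "I", "J", "K", "L", "M", "N", "O",
  "P", "Q", "R", "S", "T", "U", "V", "W",
  "X", "Y", "Z", "[", "\\\\", "]", "^", "_",
  "`", "a", "b", "c", "d", "e", "f", "g",
  "h", "i", "j", "k", "l", "m", "n", "o",
  "p", "q", "r", "s", "t", "u", "v", "w",
  "x", "y", "z", "{", "|", "}", "~", "○",
  "█", "▒", "🐱", "⬇️", "░", "✽", "●", "♥",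
  "☉", "웃", "⌂", "⬅️", "😐", "♪", "🅾️", "◆",
  "…", "➡️", "★", "⧗", "⬆️", "ˇ", "∧", "❎",
  "▤", "▥", "あ", "い", "う", "え", "お", "か",
  "き", "く", "け", "こ", "さ", "し", "す", "せ",
  "そ", "た", "ち", "つ", "て", "と", "な", "に",
  "ぬ", "ね", "の", "は", "ひ", "ふ", "へ", "ほ",
  "ま", "み", "む", "め", "も", "や", "ゆ", "よ",
  "ら", "り", "る", "れ", "ろ", "わ", "を", "ん",
  "っ", "ゃ", "ゅ", "ょ", "ア", "イ", "ウ", "エ",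
  "オ", "カ", "キ", "ク", "ケ", "コ", "サ", "シ",
  "ス", "セ", "ソ", "タ", "チ", "ツ", "テ", "ト",
  "ナ", "ニ", "ヌ", "ネ", "ノ", "ハ", "ヒ", "フ",
  "ヘ", "ホ", "マ", "ミ", "ム", "メ", "モ", "ヤ",
  "ユ", "ヨ", "ラ", "リ", "ル", "レ", "ロ", "ワ",
  "ヲ", "ン", "ッ", "ャ", "ュ", "ョ", "◜", "◝"]

def encode8bitDataAsPICO8String (data : List Int) (trans : Int) : List Char :=
  (PySem.List.enumerate data).foldl (fun s p =>
    if PySem.Int.mod (p.2 + trans) 256 = 0 then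
      if p.1 + 1 < PySem.List.len data then
        if 48 ≤ PySem.List.pyGetD data (p.1 + 1) 0 + trans ∧
            PySem.List.pyGetD data (p.1 + 1) 0 + trans ≤ 57 then
          s ++ "\\000".toList
        else
          s ++ "\\0".toList
      else s
    else
      s ++ (charTable.getD (PySem.Int.mod (p.2 + trans) 256).toNat "").toList) []

def findBestEncode (data : List Int) : String × Int :=
  let best_length : Int := PySem.List.len data * 2
  let data_length : Int := PySem.List.len data
  let st := (PySem.List.pyRange 0 256 1).foldl (fun (st : Int × Int × Bool) trans =>
      if st.2.2 then st else
      let s := encode8bitDataAsPICO8String data trans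
      if PySem.List.len s < st.1 then
        (PySem.List.len s, trans, decide (PySem.List.len s = data_length))
      else st) (best_length, -1, false)
  (String.ofList (encode8bitDataAsPICO8String [st.2.1] 0 ++ encode8bitDataAsPICO8String data st.2.1),
   st.2.1)

-- ===== PORT B =====
-- B's table: the same 256 glyphs, stored as their Unicode codepoints
def charCodes : List (List Nat) := [
  [92, 48], [185], [178], [179], [8308], [8309], [8310], [8311],
  [8312], [92, 116], [92, 110], [7495], [7580], [92, 114], [7497], [7584],
  [9646], [9632], [9633], [8281], [8280], [8214], [9664], [9654],
  [12300], [12301], [165], [8226], [12289], [12290], [12443], [12444],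
  [32], [33], [92, 34], [35], [36], [37], [38], [39],
  [40], [41], [42], [43], [44], [45], [46], [47],
  [48], [49], [50], [51], [52], [53], [54], [55],
  [56], [57], [58], [59], [60], [61], [62], [63],
  [64], [65], [66], [67], [68], [69], [70], [71],
  [72], [73], [74], [75], [76], [77], [78], [79],
  [80], [81], [82], [83], [84], [85], [86], [87],
  [88], [89], [90], [91], [92, 92], [93], [94], [95],
  [96], [97], [98], [99], [100], [101], [102], [103],
  [104], [105], [106], [107], [108], [109], [110], [111],
  [112], [113], [114], [115], [116], [117], [118], [119],
  [120], [121], [122], [123], [124], [125], [126], [9675],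
  [9608], [9618], [128049], [11015, 65039], [9617], [10045], [9679], [9829],
  [9737], [50883], [8962], [11013, 65039], [128528], [9834], [127358, 65039], [9670],
  [8230], [10145, 65039], [9733], [10711], [11014, 65039], [711], [8743], [10062],
  [9636], [9637], [12354], [12356], [12358], [12360], [12362], [12363],
  [12365], [12367], [12369], [12371], [12373], [12375], [12377], [12379],
  [12381], [12383], [12385], [12388], [12390], [12392], [12394], [12395],
  [12396], [12397], [12398], [12399], [12402], [12405], [12408], [12411],
  [12414], [12415], [12416], [12417], [12418], [12420], [12422], [12424],
  [12425], [12426], [12427], [12428], [12429], [12431], [12434], [12435],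
  [12387], [12419], [12421], [12423], [12450], [12452], [12454], [12456],
  [12458], [12459], [12461], [12463], [12465], [12467], [12469], [12471],
  [12473], [12475], [12477], [12479], [12481], [12484], [12486], [12488],
  [12490], [12491], [12492], [12493], [12494], [12495], [12498], [12501],
  [12504], [12507], [12510], [12511], [12512], [12513], [12514], [12516],
  [12518], [12520], [12521], [12522], [12523], [12524], [12525], [12527],
  [12530], [12531], [12483], [12515], [12517], [12519], [9692], [9693]]

def bTable : List String := charCodes.map (fun cs => String.ofList (cs.map Char.ofNat))

def bTok (data : List Int) (trans : Int) (i : Int) (d : Int) : List Char :=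
  let v := PySem.Int.mod (d + trans) 256
  if v = 0 then
    if i + 1 ≥ PySem.List.len data then []
    else if 48 ≤ PySem.List.pyGetD data (i + 1) 0 + trans ∧
        PySem.List.pyGetD data (i + 1) 0 + trans ≤ 57 then "\\000".toList
    else "\\0".toList
  else (bTable.getD v.toNat "").toList

def findBestEncode_alt (data : List Int) : String × Int :=
  let n : Int := PySem.List.len data
  let cl : List Int := charCodes.map (fun cs => (cs.length : Int))
  let cnt : List Int := data.foldl (fun c d =>
      PySem.List.pySetD c (PySem.Int.mod d 256)
        (PySem.List.pyGetD c (PySem.Int.mod d 256) 0 + 1)) (List.replicate 256 0)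
  let adj : List Int := (PySem.List.enumerate data).foldl (fun a p =>
      let t0 := PySem.Int.mod (-p.2) 256
      if p.1 + 1 = n then
        PySem.List.pySetD a t0 (PySem.List.pyGetD a t0 0 - 2)
      else if 48 ≤ PySem.List.pyGetD data (p.1 + 1) 0 + t0 ∧
          PySem.List.pyGetD data (p.1 + 1) 0 + t0 ≤ 57 then
        PySem.List.pySetD a t0 (PySem.List.pyGetD a t0 0 + 2)
      else a) (List.replicate 256 0)
  let st := (PySem.List.pyRange 0 256 1).foldl (fun (st : Int × Int × Bool) t =>
      if st.2.2 then st else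
      let length := PySem.List.pyGetD adj t 0 +
        (PySem.List.pyRange 0 256 1).foldl (fun acc r =>
          acc + PySem.List.pyGetD cnt r 0 *
            PySem.List.pyGetD cl (PySem.Int.mod (r + t) 256) 0) 0
      if length < st.1 then (length, t, decide (length = n)) else st) (2 * n, -1, false)
  let bt := st.2.1
  let pre := bTok [bt] 0 0 bt
  let body := ((PySem.List.enumerate data).map (fun p => bTok data bt p.1 p.2)).flatten
  (String.ofList (pre ++ body), bt)

-- ===== PRECONDITION & SPEC =====
def Spec_findBestEncode (data : List Int) (out : String × Int) : Prop := out = findBestEncode_alt data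
instance (data : List Int) (out : String × Int) : Decidable (Spec_findBestEncode data out) := by unfold Spec_findBestEncode; infer_instance

-- ===== CLAIM (what is proved, stated in full; the proofs are below) =====
def Claim_equal_findBestEncode : Prop := ∀ (data : List Int), Dom_findBestEncode data → Spec_findBestEncode data (findBestEncode data)

-- ===== LEMMAS AND PROOFS =====

-- B's codepoint-built table is A's literal glyph table
set_option maxRecDepth 16384 in
theorem bTable_eq : bTable = charTable := by decide

set_option maxRecDepth 16384 in
theorem cl_eq : charCodes.map (fun cs => ((cs.length : Nat) : Int))
    = charTable.map (fun s => PySem.Str.len s) := by decide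

-- helper: pointwise effect of a single `l[k] += v` on `getD`
theorem getD_set_int (l : List Int) (k : Nat) (v : Int) (r : Nat) (hk : k < l.length) :
    (l.set k v).getD r 0 = if r = k then v else l.getD r 0 := by
  by_cases hr : r < l.length
  · rw [List.getD_eq_getElem _ _ (by simpa using hr), List.getD_eq_getElem _ _ hr,
       List.getElem_set]
    split_ifs with h1 h2 h3 <;> first | rfl | omega
  · rw [List.getD_eq_default _ _ (by simpa using hr), if_neg (by omega),
       List.getD_eq_default _ _ (by omega)]

theorem pyGetD_toNat {α : Type} (a : List α) (d : α) (x : Int) (h : 0 ≤ x) :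
    PySem.List.pyGetD a x d = a.getD x.toNat d := by
  conv_lhs => rw [show x = ((x.toNat : Nat) : Int) by omega]
  rw [PySem.List.pyGetD_natCast]

-- A's encoder emits, per entry, exactly the token bTok computes
theorem encA_flat (data : List Int) (trans : Int) :
    encode8bitDataAsPICO8String data trans
      = ((PySem.List.enumerate data).map (fun p => bTok data trans p.1 p.2)).flatten := by
  unfold encode8bitDataAsPICO8String
  rw [PySem.List.foldl_congr_mem _ _ (fun s p => s ++ bTok data trans p.1 p.2) _ ?_]
  · rw [PySem.List.foldl_append_eq_flatMap, List.flatMap_def, List.nil_append]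
  · intro acc p _
    unfold bTok
    simp only [bTable_eq]
    by_cases h1 : PySem.Int.mod (p.2 + trans) 256 = 0
    · rw [if_pos h1, if_pos h1]
      by_cases h2 : p.1 + 1 < PySem.List.len data
      · rw [if_pos h2, if_neg (show ¬ p.1 + 1 ≥ PySem.List.len data by omega)]
        split_ifs <;> rfl
      · rw [if_neg h2, if_pos (show p.1 + 1 ≥ PySem.List.len data by omega), List.append_nil]
    · rw [if_neg h1, if_neg h1]

-- Nat-list sums cast to Int-list sums
theorem cast_sum_nat {β : Type} (l : List β) (f : β → Nat) :
    (((l.map f).sum : Nat) : Int) = (l.map (fun b => (f b : Int))).sum := by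
  induction l with
  | nil => rfl
  | cons a s ih => simp [ih]

theorem range_map_sum (n : Nat) (f : Nat → Int) :
    ((List.range n).map f).sum = ∑ k ∈ Finset.range n, f k := rfl

-- the histogram fold counts residues
theorem cnt_spec (data : List Int) : ∀ (c : List Int), c.length = 256 → ∀ r : Nat, r < 256 →
    (data.foldl (fun c d =>
        PySem.List.pySetD c (PySem.Int.mod d 256)
          (PySem.List.pyGetD c (PySem.Int.mod d 256) 0 + 1)) c).getD r 0
      = c.getD r 0 + ((data.map (fun d => (PySem.Int.mod d 256).toNat)).count r : Int) := by
  induction data with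
  | nil => intro c _ r _; simp
  | cons d ds ih =>
    intro c hc r hr
    have h256 : (0:Int) < 256 := by norm_num
    have hnn := PySem.Int.mod_nonneg d h256
    have hlt := PySem.Int.mod_lt d h256
    have hcast : PySem.Int.mod d 256 = (((PySem.Int.mod d 256).toNat : Nat) : Int) := by omega
    simp only [List.foldl_cons, List.map_cons, List.count_cons]
    rw [PySem.List.pySetD_of_nonneg _ _ hnn,
       ih _ (by rw [List.length_set]; exact hc) r hr,
       getD_set_int _ _ _ _ (by rw [hc]; omega)]
    rw [hcast, PySem.List.pyGetD_natCast]
    simp only [Int.toNat_natCast, beq_iff_eq]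
    by_cases he : r = (PySem.Int.mod d 256).toNat
    · rw [if_pos he, if_pos he.symm]
      subst he; push_cast; ring
    · rw [if_neg he, if_neg (fun h => he h.symm)]
      push_cast; ring

-- the per-entry correction B's adj table accumulates at translation t
def delta (data : List Int) (p : Int × Int) (t : Nat) : Int :=
  if (PySem.Int.mod (-p.2) 256).toNat = t then
    (if p.1 + 1 = PySem.List.len data then -2
     else if 48 ≤ PySem.List.pyGetD data (p.1 + 1) 0 + PySem.Int.mod (-p.2) 256 ∧
         PySem.List.pyGetD data (p.1 + 1) 0 + PySem.Int.mod (-p.2) 256 ≤ 57 then 2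
     else 0)
  else 0

theorem adj_spec (data : List Int) : ∀ (l : List (Int × Int)) (a : List Int), a.length = 256 →
    ∀ t : Nat, t < 256 →
    (l.foldl (fun a p =>
        let t0 := PySem.Int.mod (-p.2) 256
        if p.1 + 1 = PySem.List.len data then
          PySem.List.pySetD a t0 (PySem.List.pyGetD a t0 0 - 2)
        else if 48 ≤ PySem.List.pyGetD data (p.1 + 1) 0 + t0 ∧
            PySem.List.pyGetD data (p.1 + 1) 0 + t0 ≤ 57 then
          PySem.List.pySetD a t0 (PySem.List.pyGetD a t0 0 + 2)
        else a) a).getD t 0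
      = a.getD t 0 + (l.map (fun p => delta data p t)).sum := by
  intro l
  induction l with
  | nil => intro a _ t _; simp
  | cons p ps ih =>
    intro a ha t ht
    have h256 : (0:Int) < 256 := by norm_num
    have hnn := PySem.Int.mod_nonneg (-p.2) h256
    have hlt := PySem.Int.mod_lt (-p.2) h256
    have hkey : ∀ w : Int, PySem.List.pySetD a (PySem.Int.mod (-p.2) 256) w
        = a.set (PySem.Int.mod (-p.2) 256).toNat w :=
      fun w => PySem.List.pySetD_of_nonneg a w hnn
    have hget := pyGetD_toNat a 0 (PySem.Int.mod (-p.2) 256) hnn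
    simp only [List.foldl_cons, List.map_cons, List.sum_cons]
    by_cases hb1 : p.1 + 1 = PySem.List.len data
    · rw [if_pos hb1, hkey, hget, ih _ (by rw [List.length_set]; exact ha) t ht,
         getD_set_int _ _ _ _ (by rw [ha]; omega)]
      have hd : delta data p t
          = if t = (PySem.Int.mod (-p.2) 256).toNat then -2 else 0 := by
        unfold delta
        by_cases he : t = (PySem.Int.mod (-p.2) 256).toNat
        · rw [if_pos he.symm, if_pos hb1, if_pos he]
        · rw [if_neg (fun h => he h.symm), if_neg he]
      rw [hd]
      split_ifs with h
      · rw [h]; ring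
      · ring
    · rw [if_neg hb1]
      by_cases hb2 : 48 ≤ PySem.List.pyGetD data (p.1 + 1) 0 + PySem.Int.mod (-p.2) 256 ∧
          PySem.List.pyGetD data (p.1 + 1) 0 + PySem.Int.mod (-p.2) 256 ≤ 57
      · rw [if_pos hb2, hkey, hget, ih _ (by rw [List.length_set]; exact ha) t ht,
           getD_set_int _ _ _ _ (by rw [ha]; omega)]
        have hd : delta data p t
            = if t = (PySem.Int.mod (-p.2) 256).toNat then 2 else 0 := by
          unfold delta
          by_cases he : t = (PySem.Int.mod (-p.2) 256).toNat
          · rw [if_pos he.symm, if_neg hb1, if_pos hb2, if_pos he]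
          · rw [if_neg (fun h => he h.symm), if_neg he]
        rw [hd]
        split_ifs with h
        · rw [h]; ring
        · ring
      · rw [if_neg hb2, ih _ ha t ht]
        have hd : delta data p t = 0 := by
          unfold delta
          split_ifs <;> rfl
        rw [hd]
        ring

theorem sum_count_mul (f : Nat → Int) : ∀ (l : List Nat), (∀ x ∈ l, x < 256) →
    (∑ k ∈ Finset.range 256, (l.count k : Int) * f k) = (l.map f).sum := by
  intro l
  induction l with
  | nil => intro _; simp
  | cons x xs ih =>
    intro h
    simp only [List.count_cons, List.map_cons, List.sum_cons]
    push_cast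
    rw [show (∑ k ∈ Finset.range 256,
          ((List.count k xs : Int) + if x == k then 1 else 0) * f k)
        = (∑ k ∈ Finset.range 256, (List.count k xs : Int) * f k)
          + ∑ k ∈ Finset.range 256, (if k = x then f k else 0) from by
      rw [← Finset.sum_add_distrib]
      refine Finset.sum_congr rfl (fun k _ => ?_)
      by_cases he : k = x
      · rw [if_pos he, if_pos (beq_iff_eq.mpr he.symm)]; ring
      · rw [if_neg he, if_neg (fun hb => he (beq_iff_eq.mp hb).symm)]; ring]
    rw [ih (fun y hy => h y (List.mem_cons_of_mem _ hy)),
       Finset.sum_ite_eq' (Finset.range 256) x f]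
    rw [if_pos (Finset.mem_range.mpr (h x (List.mem_cons_self)))]
    ring

set_option maxRecDepth 8192 in
theorem clB_getD (m : Nat) (hm : m < 256) :
    (charTable.map (fun s => PySem.Str.len s)).getD m 0
      = ((charTable.getD m "").toList.length : Int) := by
  have hlen : charTable.length = 256 := by decide
  rw [List.getD_eq_getElem _ _ (by simp [hlen]; omega), List.getElem_map,
     List.getD_eq_getElem _ _ (by omega), PySem.Str.len_eq]

-- pointwise: histogram charge + correction = length of the emitted token
theorem tok_len (data : List Int) (t : Int) (h0 : 0 ≤ t) (h1 : t < 256)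
    (p : Int × Int) (hp : p ∈ PySem.List.enumerate data) :
    ((bTok data t p.1 p.2).length : Int)
      = PySem.List.pyGetD (charTable.map (fun s => PySem.Str.len s))
          (PySem.Int.mod (p.2 + t) 256) 0 + delta data p t.toNat := by
  have h256 : (0:Int) < 256 := by norm_num
  have hnnv := PySem.Int.mod_nonneg (p.2 + t) h256
  have hltv := PySem.Int.mod_lt (p.2 + t) h256
  have e2 : PySem.Int.mod (p.2 + t) 256 = (p.2 + t) % 256 :=
    PySem.Int.mod_eq_emod_of_pos h256
  have e1 : PySem.Int.mod (-p.2) 256 = (-p.2) % 256 :=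
    PySem.Int.mod_eq_emod_of_pos h256
  have hlen : PySem.List.len data = (data.length : Int) := PySem.List.len_eq data
  obtain ⟨k, hk, rfl⟩ := (PySem.List.mem_enumerate_iff data 0 p).mp hp
  rw [pyGetD_toNat _ _ _ hnnv, clB_getD _ (by omega)]
  unfold bTok
  simp only [bTable_eq]
  by_cases hv : PySem.Int.mod (data[k] + t) 256 = 0
  · rw [if_pos hv]
    have hmt : PySem.Int.mod (-data[k]) 256 = t := by
      rw [e1]; rw [e2] at hv; omega
    have hc0 : ((charTable.getD (PySem.Int.mod (data[k] + t) 256).toNat "").toList.length : Int)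
        = 2 := by rw [hv]; decide
    rw [hc0]
    unfold delta
    simp only []
    rw [if_pos (by rw [hmt] : (PySem.Int.mod (-(0 + (k:Int), data[k]).2) 256).toNat = t.toNat)]
    by_cases hge : (0 + (k:Int), data[k]).1 + 1 ≥ PySem.List.len data
    · rw [if_pos hge, if_pos (by omega : (0 + (k:Int), data[k]).1 + 1 = PySem.List.len data)]
      norm_num
    · rw [if_neg hge, if_neg (by omega : ¬ (0 + (k:Int), data[k]).1 + 1 = PySem.List.len data)]
      rw [hmt]
      by_cases hdig : 48 ≤ PySem.List.pyGetD data ((0 + (k:Int), data[k]).1 + 1) 0 + t ∧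
          PySem.List.pyGetD data ((0 + (k:Int), data[k]).1 + 1) 0 + t ≤ 57
      · rw [if_pos hdig, if_pos hdig]; decide
      · rw [if_neg hdig, if_neg hdig]; decide
  · rw [if_neg hv]
    have hd : delta data (0 + (k:Int), data[k]) t.toNat = 0 := by
      unfold delta
      rw [if_neg (by
        intro hcon
        apply hv
        simp only [] at hcon
        rw [e1] at hcon; rw [e2]; omega)]
    rw [hd, add_zero]

-- the central equality: B's arithmetic length = length of A's trial encoding
theorem lenB_eq (data : List Int) (t : Int) (h0 : 0 ≤ t) (h1 : t < 256) :
    PySem.List.pyGetD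
        ((PySem.List.enumerate data).foldl (fun a p =>
          let t0 := PySem.Int.mod (-p.2) 256
          if p.1 + 1 = PySem.List.len data then
            PySem.List.pySetD a t0 (PySem.List.pyGetD a t0 0 - 2)
          else if 48 ≤ PySem.List.pyGetD data (p.1 + 1) 0 + t0 ∧
              PySem.List.pyGetD data (p.1 + 1) 0 + t0 ≤ 57 then
            PySem.List.pySetD a t0 (PySem.List.pyGetD a t0 0 + 2)
          else a) (List.replicate 256 0)) t 0 +
      (PySem.List.pyRange 0 256 1).foldl (fun acc r =>
        acc + PySem.List.pyGetD
            (data.foldl (fun c d =>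
              PySem.List.pySetD c (PySem.Int.mod d 256)
                (PySem.List.pyGetD c (PySem.Int.mod d 256) 0 + 1)) (List.replicate 256 0)) r 0 *
          PySem.List.pyGetD (charCodes.map (fun cs => (cs.length : Int)))
            (PySem.Int.mod (r + t) 256) 0) 0
      = PySem.List.len (encode8bitDataAsPICO8String data t) := by
  have h256 : (0:Int) < 256 := by norm_num
  have hrep : ∀ m : Nat, (List.replicate 256 (0:Int)).getD m 0 = 0 := by
    intro m
    by_cases h : m < 256
    · rw [List.getD_eq_getElem _ _ (by rw [List.length_replicate]; exact h),
         List.getElem_replicate]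
    · rw [List.getD_eq_default _ _ (by rw [List.length_replicate]; omega)]
  -- the adj lookup is the summed per-entry correction
  have hadj : PySem.List.pyGetD
        ((PySem.List.enumerate data).foldl (fun a p =>
          let t0 := PySem.Int.mod (-p.2) 256
          if p.1 + 1 = PySem.List.len data then
            PySem.List.pySetD a t0 (PySem.List.pyGetD a t0 0 - 2)
          else if 48 ≤ PySem.List.pyGetD data (p.1 + 1) 0 + t0 ∧
              PySem.List.pyGetD data (p.1 + 1) 0 + t0 ≤ 57 then
            PySem.List.pySetD a t0 (PySem.List.pyGetD a t0 0 + 2)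
          else a) (List.replicate 256 0)) t 0
      = ((PySem.List.enumerate data).map (fun p => delta data p t.toNat)).sum := by
    rw [pyGetD_toNat _ _ _ h0,
       adj_spec data (PySem.List.enumerate data) (List.replicate 256 0)
         (List.length_replicate) t.toNat (by omega),
       hrep, zero_add]
  -- the correlation sum is the summed per-entry histogram charge
  have hinner : (PySem.List.pyRange 0 256 1).foldl (fun acc r =>
        acc + PySem.List.pyGetD
            (data.foldl (fun c d =>
              PySem.List.pySetD c (PySem.Int.mod d 256)
                (PySem.List.pyGetD c (PySem.Int.mod d 256) 0 + 1)) (List.replicate 256 0)) r 0 *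
          PySem.List.pyGetD (charCodes.map (fun cs => (cs.length : Int)))
            (PySem.Int.mod (r + t) 256) 0) 0
      = (data.map (fun d => PySem.List.pyGetD (charTable.map (fun s => PySem.Str.len s))
          (PySem.Int.mod (d + t) 256) 0)).sum := by
    rw [show (charCodes.map (fun cs => ((cs.length : Nat) : Int)))
        = charTable.map (fun s => PySem.Str.len s) from cl_eq]
    rw [PySem.List.foldl_add, zero_add, PySem.List.pyRange_one, List.map_map]
    have hmap : (List.range ((256:Int) - 0).toNat).map ((fun r =>
          PySem.List.pyGetD
            (data.foldl (fun c d =>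
              PySem.List.pySetD c (PySem.Int.mod d 256)
                (PySem.List.pyGetD c (PySem.Int.mod d 256) 0 + 1)) (List.replicate 256 0)) r 0 *
          PySem.List.pyGetD (charTable.map (fun s => PySem.Str.len s))
            (PySem.Int.mod (r + t) 256) 0) ∘ (fun k : Nat => (0:Int) + (k:Int)))
        = (List.range 256).map (fun k : Nat =>
            (((data.map (fun d => (PySem.Int.mod d 256).toNat)).count k : Int)) *
            PySem.List.pyGetD (charTable.map (fun s => PySem.Str.len s))
              (PySem.Int.mod ((k:Int) + t) 256) 0) := by
      rw [show ((256:Int) - 0).toNat = 256 by omega]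
      refine List.map_congr_left (fun k hk => ?_)
      have hk' : k < 256 := List.mem_range.mp hk
      simp only [Function.comp, zero_add]
      rw [PySem.List.pyGetD_natCast,
         cnt_spec data (List.replicate 256 0) (List.length_replicate) k hk',
         hrep, zero_add]
    rw [hmap, range_map_sum,
       sum_count_mul _ _ (by
         intro x hx
         obtain ⟨d, _, rfl⟩ := List.mem_map.mp hx
         have := PySem.Int.mod_lt d h256
         have := PySem.Int.mod_nonneg d h256
         omega),
       List.map_map]
    refine congrArg List.sum (List.map_congr_left (fun d _ => ?_))
    simp only [Function.comp]
    have hnn := PySem.Int.mod_nonneg d h256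
    have e1 : PySem.Int.mod d 256 = d % 256 := PySem.Int.mod_eq_emod_of_pos h256
    have e2 : PySem.Int.mod ((((PySem.Int.mod d 256).toNat : Nat) : Int) + t) 256
        = PySem.Int.mod (d + t) 256 := by
      rw [e1]
      simp only [PySem.Int.mod_eq_emod_of_pos h256]
      omega
    rw [e2]
  rw [hadj, hinner]
  -- fold both sides into a single sum over the enumeration
  have hsnd : (data.map (fun d => PySem.List.pyGetD (charTable.map (fun s => PySem.Str.len s))
        (PySem.Int.mod (d + t) 256) 0)).sum
      = ((PySem.List.enumerate data).map (fun p =>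
          PySem.List.pyGetD (charTable.map (fun s => PySem.Str.len s))
            (PySem.Int.mod (p.2 + t) 256) 0)).sum := by
    conv_lhs => rw [← PySem.List.map_snd_enumerate data 0]
    rw [List.map_map]
    rfl
  rw [hsnd, add_comm, ← PySem.List.sum_map_add_int]
  -- right-hand side: A's encoding flattened into per-entry tokens
  rw [encA_flat, PySem.List.len_eq, List.length_flatten, List.map_map,
     show (List.length ∘ fun p : Int × Int => bTok data t p.1 p.2)
       = (fun p : Int × Int => (bTok data t p.1 p.2).length) from rfl,
     cast_sum_nat (PySem.List.enumerate data) (fun p => (bTok data t p.1 p.2).length)]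
  refine congrArg List.sum (List.map_congr_left (fun p hp => ?_))
  exact (tok_len data t h0 h1 p hp).symm

theorem pre_eq (b : Int) : encode8bitDataAsPICO8String [b] 0 = bTok [b] 0 0 b := by
  rw [encA_flat]
  simp [PySem.List.enumerate_cons, PySem.List.enumerate_nil]

set_option maxRecDepth 16384 in
theorem main_lemma (data : List Int) : findBestEncode data = findBestEncode_alt data := by
  unfold findBestEncode findBestEncode_alt
  simp only []
  have hstep : ∀ (acc : Int × Int × Bool), ∀ tr ∈ PySem.List.pyRange 0 256 1,
      (fun (st : Int × Int × Bool) t =>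
        if st.2.2 then st else
        let length := PySem.List.pyGetD
            ((PySem.List.enumerate data).foldl (fun a p =>
              let t0 := PySem.Int.mod (-p.2) 256
              if p.1 + 1 = PySem.List.len data then
                PySem.List.pySetD a t0 (PySem.List.pyGetD a t0 0 - 2)
              else if 48 ≤ PySem.List.pyGetD data (p.1 + 1) 0 + t0 ∧
                  PySem.List.pyGetD data (p.1 + 1) 0 + t0 ≤ 57 then
                PySem.List.pySetD a t0 (PySem.List.pyGetD a t0 0 + 2)
              else a) (List.replicate 256 0)) t 0 +
          (PySem.List.pyRange 0 256 1).foldl (fun acc r =>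
            acc + PySem.List.pyGetD
                (data.foldl (fun c d =>
                  PySem.List.pySetD c (PySem.Int.mod d 256)
                    (PySem.List.pyGetD c (PySem.Int.mod d 256) 0 + 1)) (List.replicate 256 0)) r 0 *
              PySem.List.pyGetD (charCodes.map (fun cs => (cs.length : Int)))
                (PySem.Int.mod (r + t) 256) 0) 0
        if length < st.1 then (length, t, decide (length = PySem.List.len data)) else st) acc tr
      = (fun (st : Int × Int × Bool) trans =>
        if st.2.2 then st else
        let s := encode8bitDataAsPICO8String data trans
        if PySem.List.len s < st.1 then
          (PySem.List.len s, trans, decide (PySem.List.len s = PySem.List.len data))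
        else st) acc tr := by
    intro acc tr htr
    obtain ⟨hlo, hhi⟩ := PySem.List.mem_pyRange_one.mp htr
    simp only []
    rw [lenB_eq data tr hlo hhi]
  rw [PySem.List.foldl_congr_mem _ _ _ _ hstep,
     show (2 * PySem.List.len data : Int) = PySem.List.len data * 2 from mul_comm 2 _]
  congr 1
  rw [pre_eq, encA_flat]

-- ===== VERDICT (by name: the statement is the Claim_ definition above) =====
set_option maxRecDepth 8192 in
set_option maxHeartbeats 1000000 in
theorem findBestEncode_spec : Claim_equal_findBestEncode :=
  fun data _ => main_lemma data
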